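-- pv_equiv track=rewrite | github.com/maovshao/VHSeek | vhseek/vhseek_util/statistics_util.py | process_labels
-- ===== SOURCE A (Python) =====
-- def process_labels(labels_dict):
--     processed_labels = {}
--     for key, label in labels_dict.items():
--         if 'ssRNA-RT' in label:
--             new_label = 'ssRNA-RT'
--         elif 'dsDNA-RT' in label:
--             new_label = 'dsDNA-RT'
--         elif 'ssRNA' in label:
--             new_label = 'ssRNA'
--         elif 'dsRNA' in label:
--             new_label = 'dsRNA'
--         elif 'ssDNA' in label:
--             new_label = 'ssDNA'
--         elif 'dsDNA' in label:
--             new_label = 'dsDNA'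
--         else:
--             new_label = 'other'
--         processed_labels[key] = new_label
--     return processed_labels
-- ===== SOURCE B (Python) =====
-- # B: instead of six independent substring searches per label, do ONE left-to-right
-- # window scan of the label collecting the set of genome tags that occur, then pick
-- # the highest-priority tag found.  (Alternative decomposition; same asymptotic cost.)
--
-- _BASES = ('ssRNA', 'dsRNA', 'ssDNA', 'dsDNA')
-- _PRIORITY = ('ssRNA-RT', 'dsDNA-RT', 'ssRNA', 'dsRNA', 'ssDNA', 'dsDNA')
--
--
-- def _scan(label):
--     """Single pass: at each position record the 5-char base hit there, and whether
--     it is immediately followed by '-RT'."""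
--     found = set()
--     s = label
--     while s:
--         head = s[:5]
--         if head in _BASES:
--             found.add(head)
--             if s[5:8] == '-RT':
--                 found.add(head + '-RT')
--         s = s[1:]
--     return found
--
--
-- def process_labels(labels_dict):
--     processed_labels = {}
--     for key, label in labels_dict.items():
--         found = _scan(label)
--         new_label = 'other'
--         for cat in _PRIORITY:
--             if cat in found:
--                 new_label = cat
--                 break
--         processed_labels[key] = new_label
--     return processed_labels
-- ===== Notes on version B (the rewrite author's own statement) =====
-- stated objective: alternative
-- what changed: Replaces A's six independent substring searches per label (if/elif ladder of 'in' tests) with a single left-to-right window scan that collects the set of genome tags occurring in the label (5-char base hits plus an immediate '-RT' suffix check), followed by a first-match pick from a priority list.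
import Mathlib
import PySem

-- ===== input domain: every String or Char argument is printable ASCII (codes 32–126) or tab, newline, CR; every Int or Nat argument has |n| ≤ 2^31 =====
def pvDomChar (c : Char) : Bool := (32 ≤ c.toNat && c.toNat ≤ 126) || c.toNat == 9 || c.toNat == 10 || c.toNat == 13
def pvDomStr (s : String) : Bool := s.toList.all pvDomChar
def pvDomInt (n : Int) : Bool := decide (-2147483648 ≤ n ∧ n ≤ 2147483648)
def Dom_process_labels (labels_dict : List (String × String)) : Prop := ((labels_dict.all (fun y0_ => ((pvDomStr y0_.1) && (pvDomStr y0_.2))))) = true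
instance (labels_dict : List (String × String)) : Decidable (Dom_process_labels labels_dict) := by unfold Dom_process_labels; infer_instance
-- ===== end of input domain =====

-- B replaces A's six independent substring searches per label by ONE window scan
-- collecting the set of tags that occur, then a first-match pick from a priority list.

-- ===== PORT A =====
-- A's if/elif ladder, verbatim
def pvLadderA (label : String) : String :=
  if PySem.Str.isIn "ssRNA-RT" label then "ssRNA-RT"
  else if PySem.Str.isIn "dsDNA-RT" label then "dsDNA-RT"
  else if PySem.Str.isIn "ssRNA" label then "ssRNA"
  else if PySem.Str.isIn "dsRNA" label then "dsRNA"
  else if PySem.Str.isIn "ssDNA" label then "ssDNA"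
  else if PySem.Str.isIn "dsDNA" label then "dsDNA"
  else "other"

def process_labels (labels_dict : List (String × String)) : List (String × String) :=
  (labels_dict.foldl (fun acc kv => acc.insert kv.1 (pvLadderA kv.2))
    (PySem.Dict.empty : PySem.Dict String String)).items

-- ===== PORT B =====
-- the four 5-char bases of Source B's _BASES and the '-RT' suffix, as char lists
def pvB1 : List Char := ['s','s','R','N','A']
def pvB2 : List Char := ['d','s','R','N','A']
def pvB3 : List Char := ['s','s','D','N','A']
def pvB4 : List Char := ['d','s','D','N','A']
def pvRT : List Char := ['-','R','T']

-- body of Source B's while-loop: `head = s[:5]; if head in _BASES: add head; if s[5:8]=='-RT': add head+'-RT'`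
def pvStep (t : List Char) (found : PySem.Set String) : PySem.Set String :=
  let head := t.take 5
  if head = pvB1 ∨ head = pvB2 ∨ head = pvB3 ∨ head = pvB4 then
    let found := found.add (String.ofList head)
    if (t.drop 5).take 3 = pvRT then
      found.add (String.ofList head ++ "-RT")
    else found
  else found

-- Source B's `while s: …; s = s[1:]` loop
def pvScanGo : List Char → PySem.Set String → PySem.Set String
  | [], found => found
  | c :: rest, found => pvScanGo rest (pvStep (c :: rest) found)

def pvScan (label : String) : PySem.Set String :=
  pvScanGo label.toList (PySem.Set.ofList [])

def pvPriority : List String :=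
  ["ssRNA-RT", "dsDNA-RT", "ssRNA", "dsRNA", "ssDNA", "dsDNA"]

def pvClassifyB (label : String) : String :=
  let found := pvScan label
  ((pvPriority.find? (fun cat => found.contains cat)).getD "other")

def process_labels_alt (labels_dict : List (String × String)) : List (String × String) :=
  (labels_dict.foldl (fun acc kv => acc.insert kv.1 (pvClassifyB kv.2))
    (PySem.Dict.empty : PySem.Dict String String)).items

-- ===== PRECONDITION & SPEC =====
def Spec_process_labels (labels_dict : List (String × String)) (out : List (String × String)) : Prop := out = process_labels_alt labels_dict
instance (labels_dict : List (String × String)) (out : List (String × String)) : Decidable (Spec_process_labels labels_dict out) := by unfold Spec_process_labels; infer_instance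

-- ===== CLAIM (what is proved, stated in full; the proofs are below) =====
def Claim_equal_process_labels : Prop := ∀ (labels_dict : List (String × String)), Dom_process_labels labels_dict → Spec_process_labels labels_dict (process_labels labels_dict)

-- ===== LEMMAS AND PROOFS =====

-- one window step, seen from a base tag
theorem pv_step_base (p : String) (b : List Char)
    (hb : (b = pvB1 ∧ p = "ssRNA") ∨ (b = pvB2 ∧ p = "dsRNA") ∨ (b = pvB3 ∧ p = "ssDNA") ∨ (b = pvB4 ∧ p = "dsDNA"))
    (t : List Char) (acc : PySem.Set String) :
    p ∈ pvStep t acc ↔ p ∈ acc ∨ t.take 5 = b := by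
  simp only [pvStep]
  by_cases h1 : t.take 5 = pvB1 ∨ t.take 5 = pvB2 ∨ t.take 5 = pvB3 ∨ t.take 5 = pvB4
  · rw [if_pos h1]
    have key : ∀ (s : PySem.Set String), p ∈ s.add (String.ofList (t.take 5)) ↔ p ∈ s ∨ t.take 5 = b := by
      intro s
      rw [PySem.Set.mem_add]
      rcases h1 with h|h|h|h <;> rw [h] <;>
        rcases hb with ⟨hb1,hb2⟩|⟨hb1,hb2⟩|⟨hb1,hb2⟩|⟨hb1,hb2⟩ <;> subst hb1 <;> subst hb2 <;>
        simp [pvB1, pvB2, pvB3, pvB4]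
    by_cases h2 : (t.drop 5).take 3 = pvRT
    · rw [if_pos h2, PySem.Set.mem_add, key]
      have hne : p ≠ String.ofList (t.take 5) ++ "-RT" := by
        rcases h1 with h|h|h|h <;> rw [h] <;>
          rcases hb with ⟨hb1,hb2⟩|⟨hb1,hb2⟩|⟨hb1,hb2⟩|⟨hb1,hb2⟩ <;> subst hb2 <;>
          simp [pvB1, pvB2, pvB3, pvB4]
      simp [hne]
    · rw [if_neg h2, key]
  · rw [if_neg h1]
    have : ¬ t.take 5 = b := by
      rcases hb with ⟨hb1,_⟩|⟨hb1,_⟩|⟨hb1,_⟩|⟨hb1,_⟩ <;> subst hb1 <;> tauto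
    simp [this]

-- one window step, seen from an '-RT' tag
theorem pv_step_rt (p : String) (b : List Char)
    (hb : (b = pvB1 ∧ p = "ssRNA-RT") ∨ (b = pvB4 ∧ p = "dsDNA-RT"))
    (t : List Char) (acc : PySem.Set String) :
    p ∈ pvStep t acc ↔ p ∈ acc ∨ (t.take 5 = b ∧ (t.drop 5).take 3 = pvRT) := by
  simp only [pvStep]
  by_cases h1 : t.take 5 = pvB1 ∨ t.take 5 = pvB2 ∨ t.take 5 = pvB3 ∨ t.take 5 = pvB4
  · rw [if_pos h1]
    have hne : p ≠ String.ofList (t.take 5) := by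
      rcases h1 with h|h|h|h <;> rw [h] <;>
        rcases hb with ⟨hb1,hb2⟩|⟨hb1,hb2⟩ <;> subst hb2 <;>
        simp [pvB1, pvB2, pvB3, pvB4]
    by_cases h2 : (t.drop 5).take 3 = pvRT
    · rw [if_pos h2, PySem.Set.mem_add, PySem.Set.mem_add]
      have key : p = String.ofList (t.take 5) ++ "-RT" ↔ t.take 5 = b := by
        rcases h1 with h|h|h|h <;> rw [h] <;>
          rcases hb with ⟨hb1,hb2⟩|⟨hb1,hb2⟩ <;> subst hb1 <;> subst hb2 <;>
          simp [pvB1, pvB2, pvB3, pvB4]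
      simp [hne, key, h2]
    · rw [if_neg h2, PySem.Set.mem_add]
      simp [hne, h2]
  · rw [if_neg h1]
    have : ¬ t.take 5 = b := by
      rcases hb with ⟨hb1,_⟩|⟨hb1,_⟩ <;> subst hb1 <;> tauto
    simp [this]

-- a length-5 pattern is a prefix iff the 5-char window matches
theorem pv_prefix5 (b t : List Char) (hb : b.length = 5) :
    b <+: t ↔ t.take 5 = b := by
  rw [List.prefix_iff_eq_take, hb, eq_comm]

-- a (5+3)-char pattern is a prefix iff the window matches and '-RT' follows
theorem pv_prefix8 (b t : List Char) (hb : b.length = 5) :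
    (b ++ pvRT) <+: t ↔ t.take 5 = b ∧ (t.drop 5).take 3 = pvRT := by
  constructor
  · rintro ⟨s, hs⟩
    subst hs
    rw [List.append_assoc]
    refine ⟨?_, ?_⟩
    · have h := List.take_left (l₁ := b) (l₂ := pvRT ++ s)
      rw [hb] at h; exact h
    · have h := List.drop_left (l₁ := b) (l₂ := pvRT ++ s)
      rw [hb] at h
      rw [h]
      simp [pvRT]
  · rintro ⟨h5, h3⟩
    obtain ⟨u, hu⟩ := (pv_prefix5 b t hb).mpr h5
    subst hu
    have hdu : (b ++ u).drop 5 = u := by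
      have h := List.drop_left (l₁ := b) (l₂ := u); rw [hb] at h; exact h
    rw [hdu] at h3
    have hrtu : pvRT <+: u := by
      rw [List.prefix_iff_eq_take]
      simp [pvRT] at h3 ⊢
      exact h3.symm
    obtain ⟨s, hs⟩ := hrtu
    exact ⟨s, by rw [← hs, List.append_assoc]⟩

-- the scan loop accumulates exactly the tags whose pattern occurs in the rest of the label
theorem pv_scanGo_base (p : String) (b : List Char)
    (hb : (b = pvB1 ∧ p = "ssRNA") ∨ (b = pvB2 ∧ p = "dsRNA") ∨ (b = pvB3 ∧ p = "ssDNA") ∨ (b = pvB4 ∧ p = "dsDNA"))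
    (t : List Char) :
    ∀ (acc : PySem.Set String), p ∈ pvScanGo t acc ↔ p ∈ acc ∨ b <:+: t := by
  have hlen : b.length = 5 := by
    rcases hb with ⟨h,_⟩|⟨h,_⟩|⟨h,_⟩|⟨h,_⟩ <;> subst h <;> decide
  induction t with
  | nil =>
    intro acc
    constructor
    · intro h; exact Or.inl h
    · rintro (h | h)
      · exact h
      · exact absurd (List.eq_nil_of_infix_nil h) (by rw [← List.length_eq_zero_iff, hlen]; omega)
  | cons c rest ih =>
    intro acc
    rw [show pvScanGo (c :: rest) acc = pvScanGo rest (pvStep (c :: rest) acc) from rfl]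
    rw [ih, pv_step_base p b hb, List.infix_cons_iff, pv_prefix5 b _ hlen]
    tauto
theorem pv_scanGo_rt (p : String) (b : List Char)
    (hb : (b = pvB1 ∧ p = "ssRNA-RT") ∨ (b = pvB4 ∧ p = "dsDNA-RT"))
    (t : List Char) :
    ∀ (acc : PySem.Set String), p ∈ pvScanGo t acc ↔ p ∈ acc ∨ (b ++ pvRT) <:+: t := by
  have hlen : b.length = 5 := by
    rcases hb with ⟨h,_⟩|⟨h,_⟩ <;> subst h <;> decide
  induction t with
  | nil =>
    intro acc
    constructor
    · intro h; exact Or.inl h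
    · rintro (h | h)
      · exact h
      · exact absurd (List.eq_nil_of_infix_nil h)
          (by rw [← List.length_eq_zero_iff, List.length_append, hlen]; simp [pvRT])
  | cons c rest ih =>
    intro acc
    rw [show pvScanGo (c :: rest) acc = pvScanGo rest (pvStep (c :: rest) acc) from rfl]
    rw [ih, pv_step_rt p b hb, List.infix_cons_iff, pv_prefix8 b _ hlen]
    tauto

-- the scan set contains a tag iff the tag occurs in the label (Python's `sub in label`)
theorem pv_scan_iff (p : String)
    (hp : p = "ssRNA-RT" ∨ p = "dsDNA-RT" ∨ p = "ssRNA" ∨ p = "dsRNA" ∨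
          p = "ssDNA" ∨ p = "dsDNA") (label : String) :
    (pvScan label).contains p = PySem.Str.isIn p label := by
  have hmem : p ∈ pvScan label ↔ p.toList <:+: label.toList := by
    unfold pvScan
    rcases hp with h | h | h | h | h | h <;> subst h
    · rw [pv_scanGo_rt _ pvB1 (by tauto) label.toList]
      rw [show ("ssRNA-RT" : String).toList = pvB1 ++ pvRT by decide]
      simp
    · rw [pv_scanGo_rt _ pvB4 (by tauto) label.toList]
      rw [show ("dsDNA-RT" : String).toList = pvB4 ++ pvRT by decide]
      simp
    · rw [pv_scanGo_base _ pvB1 (by tauto) label.toList]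
      rw [show ("ssRNA" : String).toList = pvB1 by decide]
      simp
    · rw [pv_scanGo_base _ pvB2 (by tauto) label.toList]
      rw [show ("dsRNA" : String).toList = pvB2 by decide]
      simp
    · rw [pv_scanGo_base _ pvB3 (by tauto) label.toList]
      rw [show ("ssDNA" : String).toList = pvB3 by decide]
      simp
    · rw [pv_scanGo_base _ pvB4 (by tauto) label.toList]
      rw [show ("dsDNA" : String).toList = pvB4 by decide]
      simp
  rw [Bool.eq_iff_iff, PySem.Str.isIn_iff_infix, ← hmem]
  simp [PySem.Set.contains]

-- per-label agreement of the two classifiers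
theorem pv_ladder_eq_classify (label : String) : pvLadderA label = pvClassifyB label := by
  unfold pvLadderA pvClassifyB pvPriority
  simp only [List.find?]
  rw [pv_scan_iff "ssRNA-RT" (by tauto) label, pv_scan_iff "dsDNA-RT" (by tauto) label,
      pv_scan_iff "ssRNA" (by tauto) label, pv_scan_iff "dsRNA" (by tauto) label,
      pv_scan_iff "ssDNA" (by tauto) label, pv_scan_iff "dsDNA" (by tauto) label]
  cases PySem.Str.isIn "ssRNA-RT" label <;>
  cases PySem.Str.isIn "dsDNA-RT" label <;>
  cases PySem.Str.isIn "ssRNA" label <;>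
  cases PySem.Str.isIn "dsRNA" label <;>
  cases PySem.Str.isIn "ssDNA" label <;>
  cases PySem.Str.isIn "dsDNA" label <;> rfl

-- ===== VERDICT (by name: the statement is the Claim_ definition above) =====
theorem process_labels_spec : Claim_equal_process_labels := by
  intro labels_dict _
  unfold Spec_process_labels process_labels process_labels_alt
  have h : pvLadderA = pvClassifyB := funext pv_ladder_eq_classify
  rw [h]
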